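-- pv_equiv track=rewrite | github.com/b33n-tech/ycombinator-parsing | app3.py | parse_three_line_jobs
-- ===== SOURCE A (Python) =====
-- def parse_three_line_jobs(text):
--     lines = [line.strip() for line in text.strip().split('\n') if line.strip()]
--     jobs = []
--     for i in range(0, len(lines), 3):
--         if i + 2 < len(lines):
--             contrat_titre = lines[i]
--             startup = lines[i+1]
--             type_poste = lines[i+2]
--
--             if " - " in contrat_titre:
--                 contrat, titre = contrat_titre.split(" - ", 1)
--             else:
--                 contrat = ""
--                 titre = contrat_titre
--
--             jobs.append({
--                 "Type de contrat": contrat.strip(),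
--                 "Titre du poste": titre.strip(),
--                 "Startup": startup,
--                 "Type de poste": type_poste
--             })
--     return jobs
-- ===== SOURCE B (Python) =====
-- def parse_three_line_jobs(text):
--     # Single fused pass: no intermediate filtered `lines` list and no index
--     # arithmetic. A rolling buffer collects stripped non-empty lines as they
--     # stream by; each time it reaches three entries one job record is emitted
--     # and the buffer resets, so an incomplete trailing group is discarded.
--     jobs = []
--     buf = []
--     for raw in text.strip().split('\n'):
--         line = raw.strip()
--         if not line:
--             continue
--         buf.append(line)
--         if len(buf) == 3:
--             contrat_titre, startup, type_poste = buf
--             buf = []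
--             if " - " in contrat_titre:
--                 contrat, titre = contrat_titre.split(" - ", 1)
--             else:
--                 contrat, titre = "", contrat_titre
--             jobs.append({
--                 "Type de contrat": contrat.strip(),
--                 "Titre du poste": titre.strip(),
--                 "Startup": startup,
--                 "Type de poste": type_poste,
--             })
--     return jobs
-- ===== Notes on version B (the rewrite author's own statement) =====
-- stated objective: alternative
-- what changed: B replaces A's two staged passes (materialise a filtered list of stripped lines, then a stepped index loop over range(0, len, 3) with an i+2 < len guard and positional lines[i..i+2] lookups) by one fused streaming pass: each raw line is stripped and filtered inline and pushed into a rolling 3-slot buffer that emits a job and resets when full, so no intermediate list, no indices and no guard exist.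
import Mathlib
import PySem

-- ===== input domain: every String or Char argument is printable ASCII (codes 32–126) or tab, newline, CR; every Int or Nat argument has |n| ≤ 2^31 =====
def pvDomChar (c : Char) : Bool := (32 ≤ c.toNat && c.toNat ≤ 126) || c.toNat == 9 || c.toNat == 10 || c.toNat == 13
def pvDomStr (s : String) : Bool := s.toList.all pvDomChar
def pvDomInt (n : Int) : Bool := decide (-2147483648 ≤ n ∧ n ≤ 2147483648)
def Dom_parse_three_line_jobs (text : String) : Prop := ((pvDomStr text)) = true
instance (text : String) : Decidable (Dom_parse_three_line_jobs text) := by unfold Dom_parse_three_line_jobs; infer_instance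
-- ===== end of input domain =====

-- B replaces A's staged passes (filtered list, then stepped index loop) with one fused
-- streaming pass over the raw lines using a rolling 3-slot buffer (objective: alternative).

-- ===== PORT A =====
-- lines = [line.strip() for line in text.strip().split('\n') if line.strip()]
def pvLines (text : String) : List String :=
  (((PySem.Str.split? (PySem.Str.strip text) "\n").getD []).map PySem.Str.strip).filter
    (fun l => decide (l ≠ ""))

-- the per-triple body both Pythons share verbatim: '" - " in ct' guard,
-- split(" - ", 1), the four-key dict
def pvJob (ct startup tp : String) : List (String × String) :=
  let ct2 : String × String :=
    if PySem.Str.isIn " - " ct then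
      let parts := (PySem.Str.splitMax? ct " - " 1).getD []
      (PySem.List.pyGetD parts 0 "", PySem.List.pyGetD parts 1 "")
    else ("", ct)
  [("Type de contrat", PySem.Str.strip ct2.1), ("Titre du poste", PySem.Str.strip ct2.2),
   ("Startup", startup), ("Type de poste", tp)]

-- 'for i in range(0, len(lines), 3): if i + 2 < len(lines): … jobs.append(…)'
def pvLoopA (lines : List String) : List (List (String × String)) :=
  (PySem.List.pyRange 0 (lines.length : Int) 3).foldl
    (fun jobs i =>
      if i + 2 < (lines.length : Int) then
        jobs ++ [pvJob (PySem.List.pyGetD lines i "") (PySem.List.pyGetD lines (i + 1) "")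
                   (PySem.List.pyGetD lines (i + 2) "")]
      else jobs) []

def parse_three_line_jobs (text : String) : List (List (String × String)) :=
  pvLoopA (pvLines text)

-- ===== PORT B =====
-- the loop body: strip, skip blanks, push into the rolling buffer, emit on a full triple
def pvStepB (st : List (List (String × String)) × List String) (raw : String) :
    List (List (String × String)) × List String :=
  let line := PySem.Str.strip raw
  if line = "" then st
  else
    let buf := st.2 ++ [line]
    if buf.length = 3 then
      (st.1 ++ [pvJob (PySem.List.pyGetD buf 0 "") (PySem.List.pyGetD buf 1 "")
                  (PySem.List.pyGetD buf 2 "")], [])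
    else (st.1, buf)

-- 'for raw in text.strip().split('\n'): …' over the state (jobs, buf); return jobs
def parse_three_line_jobs_alt (text : String) : List (List (String × String)) :=
  (((PySem.Str.split? (PySem.Str.strip text) "\n").getD []).foldl pvStepB ([], [])).1

-- ===== PRECONDITION & SPEC =====
def Spec_parse_three_line_jobs (text : String) (out : List (List (String × String))) : Prop := out = parse_three_line_jobs_alt text
instance (text : String) (out : List (List (String × String))) : Decidable (Spec_parse_three_line_jobs text out) := by unfold Spec_parse_three_line_jobs; infer_instance

-- ===== CLAIM (what is proved, stated in full; the proofs are below) =====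
def Claim_equal_parse_three_line_jobs : Prop := ∀ (text : String), Dom_parse_three_line_jobs text → Spec_parse_three_line_jobs text (parse_three_line_jobs text)

-- ===== LEMMAS AND PROOFS =====
-- proof-only middle form: both programs compute the triple-grouping of the cleaned lines
def pvTriples : List String → List (List (String × String))
  | ct :: startup :: tp :: rest => pvJob ct startup tp :: pvTriples rest
  | _ => []

lemma pvTriples_short (l : List String) (h : l.length ≤ 2) : pvTriples l = [] := by
  match l with
  | [] => rfl
  | [_] => rfl
  | [_, _] => rfl
  | _ :: _ :: _ :: _ => simp at h

lemma pyRange3_nil (b : Int) (h : b ≤ 0) : PySem.List.pyRange 0 b 3 = [] := by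
  rw [PySem.List.pyRange_of_pos 0 b (by norm_num : (0:Int) < 3)]
  simp [show ¬ (0:Int) < b by omega]

lemma pyRange3_cons (b : Int) (h : 0 < b) :
    PySem.List.pyRange 0 b 3 = 0 :: (PySem.List.pyRange 0 (b - 3) 3).map (· + 3) := by
  rw [PySem.List.pyRange_of_pos 0 b (by norm_num : (0:Int) < 3),
      PySem.List.pyRange_of_pos 0 (b-3) (by norm_num : (0:Int) < 3)]
  by_cases hb : 3 < b
  · have h1 : ((b - 0 + 3 - 1) / 3).toNat = ((b - 3 - 0 + 3 - 1) / 3).toNat + 1 := by omega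
    rw [if_pos h, if_pos (by omega), h1, List.range_succ_eq_map]
    simp [List.map_map, Function.comp]
    intro a _
    ring
  · have h1 : ((b - 0 + 3 - 1) / 3).toNat = 1 := by omega
    rw [if_pos h, if_neg (by omega), h1]
    simp

lemma loopA_eq : ∀ (ls : List String) (acc : List (List (String × String))),
    (PySem.List.pyRange 0 (ls.length : Int) 3).foldl
      (fun jobs i =>
        if i + 2 < (ls.length : Int) then
          jobs ++ [pvJob (PySem.List.pyGetD ls i "") (PySem.List.pyGetD ls (i + 1) "")
                     (PySem.List.pyGetD ls (i + 2) "")]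
        else jobs) acc = acc ++ pvTriples ls
  | [], acc => by
      simp [pvTriples, pyRange3_nil]
  | [a], acc => by
      have : ((List.length [a] : Int)) = 1 := by simp
      rw [this, show PySem.List.pyRange 0 (1:Int) 3 = [0] from by decide]
      simp [pvTriples]
  | [a, b], acc => by
      have : ((List.length [a, b] : Int)) = 2 := by simp
      rw [this, show PySem.List.pyRange 0 (2:Int) 3 = [0] from by decide]
      simp [pvTriples]
  | a :: b :: c :: rest, acc => by
      have ih := loopA_eq rest
      have hn : (0:Int) ≤ (rest.length : Int) := Int.natCast_nonneg _
      have hlen : ((List.length (a :: b :: c :: rest) : Int)) = (rest.length : Int) + 3 := by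
        simp [List.length_cons]; ring
      rw [hlen, pyRange3_cons _ (by omega)]
      simp only [List.foldl_cons, List.foldl_map]
      rw [if_pos (by omega : (0:Int) + 2 < (rest.length : Int) + 3)]
      have g0 : PySem.List.pyGetD (a :: b :: c :: rest) 0 "" = a := by
        rw [PySem.List.pyGetD_of_nonneg _ _ (by norm_num)]; simp
      have g1 : PySem.List.pyGetD (a :: b :: c :: rest) (0 + 1) "" = b := by
        rw [PySem.List.pyGetD_of_nonneg _ _ (by norm_num)]
        norm_num [List.getD]
      have g2 : PySem.List.pyGetD (a :: b :: c :: rest) (0 + 2) "" = c := by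
        rw [PySem.List.pyGetD_of_nonneg _ _ (by norm_num)]
        norm_num [List.getD]
        rfl
      rw [g0, g1, g2, show ((rest.length : Int) + 3 - 3) = (rest.length : Int) from by ring]
      rw [PySem.List.foldl_congr_mem _ _
        (fun jobs i =>
          if i + 2 < (rest.length : Int) then
            jobs ++ [pvJob (PySem.List.pyGetD rest i "")
                       (PySem.List.pyGetD rest (i + 1) "")
                       (PySem.List.pyGetD rest (i + 2) "")]
          else jobs) _ ?_]
      · rw [ih]
        simp [pvTriples]
      · intro acc' k hk
        have hk0 : (0:Int) ≤ k := by
          have := (PySem.List.mem_pyRange_iff_of_pos (by norm_num : (0:Int) < 3) k).mp hk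
          omega
        have e : ∀ (j : Int), 0 ≤ j →
            PySem.List.pyGetD (a :: b :: c :: rest) (j + 3) "" = PySem.List.pyGetD rest j "" := by
          intro j hj
          rw [PySem.List.pyGetD_of_nonneg _ _ (by omega), PySem.List.pyGetD_of_nonneg _ _ hj]
          have : (j + 3).toNat = j.toNat + 3 := by omega
          rw [this]
          simp [List.getD]
        refine if_congr (by omega) ?_ rfl
        rw [show k + 3 + 1 = (k + 1) + 3 by ring, show k + 3 + 2 = (k + 2) + 3 by ring,
            e k hk0, e (k+1) (by omega), e (k+2) (by omega)]

-- B's streaming fold computes the triple-grouping of the cleaned remainder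
lemma foldB_eq : ∀ (ls : List String) (jobs : List (List (String × String)))
    (buf : List String), buf.length ≤ 2 →
    (ls.foldl pvStepB (jobs, buf)).1 =
      jobs ++ pvTriples (buf ++ ((ls.map PySem.Str.strip).filter (fun l => decide (l ≠ ""))))
  | [], jobs, buf, h => by
      simp [pvTriples_short buf h]
  | raw :: ls, jobs, buf, h => by
      rw [List.foldl_cons]
      show (ls.foldl pvStepB (pvStepB (jobs, buf) raw)).1 = _
      rw [pvStepB]
      by_cases hl : PySem.Str.strip raw = ""
      · rw [if_pos hl]
        rw [foldB_eq ls jobs buf h]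
        simp [hl]
      · simp only [if_neg hl]
        by_cases h3 : (buf ++ [PySem.Str.strip raw]).length = 3
        · simp only [if_pos h3]
          have hb2 : buf.length = 2 := by simp at h3; omega
          obtain ⟨a, b, rfl⟩ : ∃ a b, buf = [a, b] := by
            match buf, hb2 with
            | [a, b], _ => exact ⟨a, b, rfl⟩
          have hbuf : [a, b] ++ [PySem.Str.strip raw] = [a, b, PySem.Str.strip raw] := rfl
          rw [hbuf, foldB_eq ls _ [] (by simp)]
          have g0 : PySem.List.pyGetD [a, b, PySem.Str.strip raw] 0 "" = a := by
            rw [PySem.List.pyGetD_of_nonneg _ _ (by norm_num)]; simp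
          have g1 : PySem.List.pyGetD [a, b, PySem.Str.strip raw] 1 "" = b := by
            rw [PySem.List.pyGetD_of_nonneg _ _ (by norm_num)]; norm_num [List.getD]
          have g2 : PySem.List.pyGetD [a, b, PySem.Str.strip raw] 2 "" = PySem.Str.strip raw := by
            rw [PySem.List.pyGetD_of_nonneg _ _ (by norm_num)]; norm_num [List.getD]; rfl
          rw [g0, g1, g2]
          simp [hl, pvTriples]
        · simp only [if_neg h3]
          have hb1 : buf.length ≤ 1 := by simp at h3; omega
          rw [foldB_eq ls jobs (buf ++ [PySem.Str.strip raw]) (by simp; omega)]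
          simp [hl]

-- ===== VERDICT (by name: the statement is the Claim_ definition above) =====
theorem parse_three_line_jobs_spec : Claim_equal_parse_three_line_jobs := by
  intro text _
  show parse_three_line_jobs text = parse_three_line_jobs_alt text
  rw [parse_three_line_jobs, parse_three_line_jobs_alt, pvLoopA,
      loopA_eq (pvLines text) [], foldB_eq _ [] [] (by simp)]
  simp [pvLines]
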